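-- pv_equiv track=rewrite | github.com/usefortemp787/lib | binning.py | BinByBoundary
-- ===== SOURCE A (Python) =====
-- def BinByBoundary(arr, n):
--     sarr = sorted(arr)
--     bin_size = len(sarr) // n
--     res = []
--
--     for i in range(0, len(sarr), bin_size):
--         bin = sarr[i:i + bin_size]
--         binMin = min(bin)
--         binMax = max(bin)
--         tempbin = []
--
--         for x in bin:
--             if abs(x-binMin) < abs(x-binMax):
--                 tempbin.append(binMin)
--             else:
--                 tempbin.append(binMax)
--
--         res.append(tempbin)
--
--     return res
-- ===== SOURCE B (Python) =====
-- def BinByBoundary(arr, n):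
--     sarr = sorted(arr)
--     step = len(sarr) // n
--     res = []
--     for i in range(0, len(sarr), step):
--         b = sarr[i:i + step]
--         lo_v, hi_v = b[0], b[-1]
--         key = (lo_v + hi_v + 1) // 2  # smallest x with 2*x >= lo_v + hi_v
--         lo, hi = 0, len(b)
--         while lo < hi:  # bisect_left(b, key): first index with b[idx] >= key
--             mid = (lo + hi) // 2
--             if b[mid] < key:
--                 lo = mid + 1
--             else:
--                 hi = mid
--         res.append([lo_v] * lo + [hi_v] * (len(b) - lo))
--     return res
-- ===== Notes on version B (the rewrite author's own statement) =====
-- stated objective: alternative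
-- what changed: Each sorted bin's per-element nearest-boundary comparison loop is replaced by a hand-written binary search for the min/max split index (exact integer midpoint, no floats) followed by bulk list-replication construction.
import Mathlib
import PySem

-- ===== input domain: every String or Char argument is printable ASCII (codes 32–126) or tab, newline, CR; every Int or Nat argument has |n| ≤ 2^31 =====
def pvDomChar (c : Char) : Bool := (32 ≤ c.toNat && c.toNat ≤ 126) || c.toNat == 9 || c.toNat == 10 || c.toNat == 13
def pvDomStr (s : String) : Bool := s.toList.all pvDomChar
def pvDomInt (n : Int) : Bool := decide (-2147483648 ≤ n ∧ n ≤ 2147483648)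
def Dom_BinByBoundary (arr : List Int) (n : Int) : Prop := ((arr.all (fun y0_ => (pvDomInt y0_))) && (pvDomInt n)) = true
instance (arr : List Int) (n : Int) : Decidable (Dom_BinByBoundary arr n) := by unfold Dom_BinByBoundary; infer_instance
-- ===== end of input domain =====

-- B replaces A's per-element nearest-boundary scan of each sorted bin by a binary search for
-- the min/max split index followed by bulk replicate construction (objective: alternative).

-- ===== PORT A =====
-- literal port of A: sort, bin_size = len//n, loop over range(0, len, bin_size), per-bin
-- min/max (Python min/max raise on an empty bin — unreachable under Pre_; the `[]` arm is dead)
-- and a per-element append loop choosing the nearer boundary (tie goes to the max).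
def BinByBoundary (arr : List Int) (n : Int) : List (List Int) :=
  let sarr := PySem.List.sorted arr (fun x => x) false
  let binSize := PySem.Int.floordiv (PySem.List.len sarr) n
  (PySem.List.pyRange 0 (PySem.List.len sarr) binSize).foldl (fun res i =>
    let bin := PySem.List.slice sarr (some i) (some (i + binSize))
    match PySem.List.min? bin (fun x => x), PySem.List.max? bin (fun x => x) with
    | some binMin, some binMax =>
        let tempbin := bin.foldl (fun tb x =>
          if |x - binMin| < |x - binMax| then tb ++ [binMin] else tb ++ [binMax]) []
        res ++ [tempbin]
    | _, _ => res ++ [[]]) []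

-- ===== PORT B =====
-- transliteration of Source B's hand-written bisect_left while-loop (b[mid] is read via getD:
-- the loop only touches indices mid < hi ≤ len b, where Python's b[mid] returns)
def pvBisectLoop (b : List Int) (key : Int) (lo hi : Nat) : Nat :=
  if h : lo < hi then
    let mid := (lo + hi) / 2
    if b.getD mid 0 < key then pvBisectLoop b key (mid + 1) hi
    else pvBisectLoop b key lo mid
  else lo
termination_by hi - lo
decreasing_by all_goals omega

-- literal port of B: same sort and slicing, then b[0], b[-1] (raise on an empty bin —
-- unreachable under Pre_; the `[]` arm is dead), a binary search for the split index and
-- two replicated blocks.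
def BinByBoundary_alt (arr : List Int) (n : Int) : List (List Int) :=
  let sarr := PySem.List.sorted arr (fun x => x) false
  let step := PySem.Int.floordiv (PySem.List.len sarr) n
  (PySem.List.pyRange 0 (PySem.List.len sarr) step).foldl (fun res i =>
    let b := PySem.List.slice sarr (some i) (some (i + step))
    match PySem.List.pyGet? b 0 with
    | none => res ++ [[]]
    | some loV =>
      match PySem.List.pyGet? b (-1) with
      | none => res ++ [[]]
      | some hiV =>
        let key := PySem.Int.floordiv (loV + hiV + 1) 2
        let idx := pvBisectLoop b key 0 b.length
        res ++ [List.replicate idx loV ++ List.replicate (b.length - idx) hiV]) []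

-- ===== PRECONDITION & SPEC =====
-- Pre_ excludes exactly the inputs where Python A raises: n = 0 (ZeroDivisionError in len//n)
-- and len(arr)//n = 0 (step-0 range(), ValueError).
def Pre_BinByBoundary (arr : List Int) (n : Int) : Prop :=
  n ≠ 0 ∧ PySem.Int.floordiv (arr.length : Int) n ≠ 0
instance (arr : List Int) (n : Int) : Decidable (Pre_BinByBoundary arr n) := by
  unfold Pre_BinByBoundary; infer_instance
def pvWitness_BinByBoundary : List Int × Int := ([3, 1, 2, 7], 2)

def Spec_BinByBoundary (arr : List Int) (n : Int) (out : List (List Int)) : Prop := out = BinByBoundary_alt arr n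
instance (arr : List Int) (n : Int) (out : List (List Int)) : Decidable (Spec_BinByBoundary arr n out) := by unfold Spec_BinByBoundary; infer_instance

-- ===== CLAIM (what is proved, stated in full; the proofs are below) =====
def Claim_equal_BinByBoundary : Prop := ∀ (arr : List Int) (n : Int), Dom_BinByBoundary arr n → Pre_BinByBoundary arr n → Spec_BinByBoundary arr n (BinByBoundary arr n)

-- ===== LEMMAS AND PROOFS =====

-- a sorted list is monotone in its indices
theorem pv_pairwise_getElem_le {l : List Int} (hp : l.Pairwise (· ≤ ·))
    {i j : Nat} (hij : i ≤ j) (hj : j < l.length) : l[i]'(by omega) ≤ l[j] := by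
  rcases Nat.eq_or_lt_of_le hij with h | h
  · subst h; rfl
  · exact List.pairwise_iff_getElem.mp hp i j (by omega) hj h

theorem pv_head_le_of_pairwise {l : List Int} (hp : l.Pairwise (· ≤ ·)) (hne : l ≠ [])
    {x : Int} (hx : x ∈ l) : l.head hne ≤ x := by
  obtain ⟨i, hi, rfl⟩ := List.mem_iff_getElem.mp hx
  rw [List.head_eq_getElem]
  exact pv_pairwise_getElem_le hp (Nat.zero_le i) hi

theorem pv_le_getLast_of_pairwise {l : List Int} (hp : l.Pairwise (· ≤ ·)) (hne : l ≠ [])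
    {x : Int} (hx : x ∈ l) : x ≤ l.getLast hne := by
  obtain ⟨i, hi, rfl⟩ := List.mem_iff_getElem.mp hx
  rw [List.getLast_eq_getElem]
  exact pv_pairwise_getElem_le hp (by omega) (by omega)

-- min?/max? of a sorted nonempty list are its head/last element
theorem pv_min_eq_head {l : List Int} (hp : l.Pairwise (· ≤ ·)) (hne : l ≠ []) :
    PySem.List.min? l (fun x => x) = some (l.head hne) := by
  rcases h : PySem.List.min? l (fun x => x) with _ | m
  · exact absurd ((PySem.List.min?_eq_none_iff _ _).mp h) hne
  · have h1 := PySem.List.min?_isMin h _ (List.head_mem hne)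
    have h2 := pv_head_le_of_pairwise hp hne (PySem.List.min?_mem h)
    have : m = l.head hne := le_antisymm h1 h2
    rw [this]

theorem pv_max_eq_getLast {l : List Int} (hp : l.Pairwise (· ≤ ·)) (hne : l ≠ []) :
    PySem.List.max? l (fun x => x) = some (l.getLast hne) := by
  rcases h : PySem.List.max? l (fun x => x) with _ | m
  · exact absurd ((PySem.List.max?_eq_none_iff _ _).mp h) hne
  · have h1 := PySem.List.max?_isMax h _ (List.getLast_mem hne)
    have h2 := pv_le_getLast_of_pairwise hp hne (PySem.List.max?_mem h)
    have : m = l.getLast hne := le_antisymm h2 h1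
    rw [this]

-- nearest-boundary choice ↔ comparison with the integer midpoint ⌈(m+M)/2⌉
theorem pv_point (m M x : Int) (h1 : m ≤ x) (h2 : x ≤ M) :
    (if |x - m| < |x - M| then m else M) =
      if x < PySem.Int.floordiv (m + M + 1) 2 then m else M := by
  rw [PySem.Int.floordiv_eq_ediv_of_pos (by omega)]
  have hm : |x - m| = x - m := abs_of_nonneg (by omega)
  have hM : |x - M| = M - x := by rw [abs_of_nonpos (by omega)]; ring
  rw [hm, hM]
  by_cases hc : x - m < M - x
  · rw [if_pos hc, if_pos (by omega)]
  · rw [if_neg hc, if_neg (by omega)]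

-- countP of a predicate that is characterised by an index cut
theorem pv_countP_eq_cut (l : List Int) (p : Int → Bool) (c : Nat) (hc : c ≤ l.length)
    (h : ∀ j, j < l.length → (p (l.getD j 0) = true ↔ j < c)) :
    l.countP p = c := by
  induction l generalizing c with
  | nil => simp_all
  | cons a t ih =>
    rcases c with _ | c'
    · have ha : ¬ p a = true := fun hh =>
        absurd ((h 0 (by simp)).mp (by simpa using hh)) (by omega)
      rw [List.countP_cons_of_neg ha]
      exact ih 0 (by omega) (fun j hj => by
        have h2 := h (j+1) (by simp; omega)
        simp only [List.getD_cons_succ] at h2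
        exact ⟨fun hh => absurd (h2.mp hh) (by omega), fun hh => by omega⟩)
    · have ha : p a = true := by
        have := (h 0 (by simp)).mpr (by omega)
        simpa using this
      rw [List.countP_cons_of_pos ha]
      have := ih c' (by simp at hc; omega) (fun j hj => by
        have h2 := h (j+1) (by simp; omega)
        simp only [List.getD_cons_succ] at h2
        exact ⟨fun hh => by have := h2.mp hh; omega, fun hh => h2.mpr (by omega)⟩)
      omega

-- the bisect loop lands on the cut point of a sorted list
theorem pv_bisect_inv (b : List Int) (key : Int) (hp : b.Pairwise (· ≤ ·)) :
    ∀ fuel lo hi, hi - lo ≤ fuel → lo ≤ hi → hi ≤ b.length →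
      (∀ j, j < lo → b.getD j 0 < key) →
      (∀ j, hi ≤ j → j < b.length → ¬ b.getD j 0 < key) →
      pvBisectLoop b key lo hi = b.countP (fun x => decide (x < key)) := by
  intro fuel
  induction fuel with
  | zero =>
    intro lo hi hf hle hlen hlow hhigh
    have : lo = hi := by omega
    subst this
    rw [pvBisectLoop, dif_neg (by omega)]
    exact (pv_countP_eq_cut b _ lo (by omega) (fun j hj => by
      constructor
      · intro hh
        by_contra hcon
        exact (hhigh j (by omega) hj) (by simpa using hh)
      · intro hh
        simpa using hlow j hh)).symm
  | succ f ih =>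
    intro lo hi hf hle hlen hlow hhigh
    by_cases h : lo < hi
    · rw [pvBisectLoop, dif_pos h]
      simp only []
      set mid := (lo + hi) / 2 with hmid
      have hmlt : mid < hi := by omega
      have hmge : lo ≤ mid := by omega
      have hmb : mid < b.length := by omega
      by_cases hc : b.getD mid 0 < key
      · rw [if_pos hc]
        refine ih (mid+1) hi (by omega) (by omega) hlen ?_ hhigh
        intro j hj
        rcases Nat.lt_or_ge j lo with hjl | hjl
        · exact hlow j hjl
        · have : b[j]'(by omega) ≤ b[mid] := pv_pairwise_getElem_le hp (by omega) hmb
          rw [List.getD_eq_getElem _ _ (by omega : j < b.length)]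
          rw [List.getD_eq_getElem _ _ hmb] at hc
          omega
      · rw [if_neg hc]
        refine ih lo mid (by omega) (by omega) (by omega) hlow ?_
        intro j hj hjb
        have : b[mid] ≤ b[j]'hjb := pv_pairwise_getElem_le hp hj hjb
        rw [List.getD_eq_getElem _ _ hjb]
        rw [List.getD_eq_getElem _ _ hmb] at hc
        omega
    · have : lo = hi := by omega
      subst this
      rw [pvBisectLoop, dif_neg (by omega)]
      exact (pv_countP_eq_cut b _ lo (by omega) (fun j hj => by
        constructor
        · intro hh
          by_contra hcon
          exact (hhigh j (by omega) hj) (by simpa using hh)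
        · intro hh
          simpa using hlow j hh)).symm

theorem pv_bisect_eq_countP (b : List Int) (key : Int) (hp : b.Pairwise (· ≤ ·)) :
    pvBisectLoop b key 0 b.length = b.countP (fun x => decide (x < key)) :=
  pv_bisect_inv b key hp b.length 0 b.length (by omega) (by omega) le_rfl
    (by omega) (fun j hj hjb => by omega)

-- on a list whose elements are all ≥ k the cut map is a constant block
theorem pv_map_const_of_all_ge (l : List Int) (m M k : Int)
    (h : ∀ x ∈ l, ¬ x < k) :
    l.map (fun x => if x < k then m else M) = List.replicate l.length M := by
  induction l with
  | nil => rfl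
  | cons a t ih =>
    simp only [List.map_cons, if_neg (h a (by simp)), List.length_cons, List.replicate_succ]
    rw [ih (fun x hx => h x (by simp [hx]))]

theorem pv_map_cut_aux (l : List Int) (m M k : Int) (hp : l.Pairwise (· ≤ ·)) :
    l.map (fun x => if x < k then m else M) =
      List.replicate (l.countP (fun x => decide (x < k))) m ++
      List.replicate (l.length - l.countP (fun x => decide (x < k))) M := by
  induction l with
  | nil => rfl
  | cons a t ih =>
    obtain ⟨ha, ht⟩ := List.pairwise_cons.mp hp
    by_cases hc : a < k
    · rw [List.countP_cons_of_pos (by simpa using hc)]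
      simp only [List.map_cons, if_pos hc, List.length_cons, List.replicate_succ]
      rw [ih ht]
      simp [Nat.succ_sub_succ]
    · have hall : ∀ x ∈ a :: t, ¬ x < k := by
        intro x hx
        rcases List.mem_cons.mp hx with rfl | hx
        · exact hc
        · exact fun hlt => hc (by have := ha x hx; omega)
      rw [List.countP_eq_zero.mpr (by intro x hx; simpa using hall x hx)]
      rw [pv_map_const_of_all_ge _ m M k hall]
      simp

-- the per-element boundary scan of a sorted bin is two replicated blocks
theorem pv_map_cut (l : List Int) (m M k : Int) (hp : l.Pairwise (· ≤ ·))
    (hpt : ∀ x ∈ l, (if |x - m| < |x - M| then m else M) = if x < k then m else M) :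
    l.map (fun x => if |x - m| < |x - M| then m else M) =
      List.replicate (l.countP (fun x => decide (x < k))) m ++
      List.replicate (l.length - l.countP (fun x => decide (x < k))) M := by
  rw [List.map_congr_left hpt]
  exact pv_map_cut_aux l m M k hp

theorem pv_main (arr : List Int) (n : Int)
    (hfd : PySem.Int.floordiv (arr.length : Int) n ≠ 0) :
    BinByBoundary arr n = BinByBoundary_alt arr n := by
  unfold BinByBoundary BinByBoundary_alt
  simp only [PySem.List.len_eq, PySem.List.length_sorted]
  set sarr := PySem.List.sorted arr (fun x => x) false with hsarr
  set step := PySem.Int.floordiv (arr.length : Int) n with hstepdef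
  have hps : sarr.Pairwise (· ≤ ·) := PySem.List.sorted_pairwise arr (fun x => x)
  have hlen : sarr.length = arr.length := PySem.List.length_sorted arr _ _
  rcases lt_or_gt_of_ne hfd with hneg | hpos
  · -- negative step: the range is empty on both sides
    rw [PySem.List.pyRange]
    rw [if_neg (by omega), if_neg (by omega), if_neg (by omega)]
    rfl
  · -- positive step: bins coincide element-wise
    apply PySem.List.foldl_congr_mem
    intro acc i hi
    obtain ⟨hi0, hilt, -⟩ := (PySem.List.mem_pyRange_iff_of_pos hpos i).mp hi
    set bin := PySem.List.slice sarr (some i) (some (i + step)) with hbin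
    have hbe : bin = List.take ((i + step).toNat - i.toNat) (List.drop i.toNat sarr) :=
      PySem.List.slice_toNat sarr hi0 (by omega)
    have hblen : 0 < bin.length := by
      rw [hbe, List.length_take, List.length_drop, hlen]
      omega
    have hne : bin ≠ [] := List.ne_nil_of_length_pos hblen
    have hpb : bin.Pairwise (· ≤ ·) :=
      List.Pairwise.sublist (hbe ▸ (List.take_sublist _ _).trans (List.drop_sublist _ _)) hps
    set m := bin.head hne with hm
    set M := bin.getLast hne with hM
    rw [pv_min_eq_head hpb hne, pv_max_eq_getLast hpb hne]
    rw [PySem.List.pyGet?_zero, PySem.List.pyGet?_neg_one,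
      List.getElem?_eq_getElem hblen, List.getLast?_eq_some_getLast hne]
    simp only [← hm, ← hM, ← List.head_eq_getElem hne]
    set key := PySem.Int.floordiv (m + M + 1) 2 with hkey
    have hbodies : (fun (tb : List Int) x =>
        if |x - m| < |x - M| then tb ++ [m] else tb ++ [M]) =
        fun tb x => tb ++ [if |x - m| < |x - M| then m else M] := by
      funext tb x; split <;> rfl
    rw [hbodies, PySem.List.foldl_append_singleton_eq_map]
    rw [pv_map_cut bin m M key hpb (fun x hx =>
      pv_point m M x (pv_head_le_of_pairwise hpb hne hx)
        (pv_le_getLast_of_pairwise hpb hne hx))]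
    rw [pv_bisect_eq_countP bin key hpb]
    simp

-- ===== VERDICT (by name: the statement is the Claim_ definition above) =====
theorem BinByBoundary_spec : Claim_equal_BinByBoundary := by
  intro arr n _ hpre
  unfold Spec_BinByBoundary
  exact pv_main arr n hpre.2
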